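-- pv_equiv track=rewrite | github.com/sh2mg136/python_word_finder | WordFinderMP.py | create_mask
-- ===== SOURCE A (Python) =====
-- def create_mask(mask: str, letters: str) -> str:
--     inner_mask = "^"
--     cnt = 0
--     for ch in mask:
--         if ch == '*' or ch == '?':
--             cnt += 1
--         else:
--             if cnt > 0:
--                 inner_mask += "[" + letters + "]{" + str(cnt) + "}"
--                 cnt = 0
--             inner_mask += ch
--     if cnt > 0:
--         inner_mask += "[" + letters + "]{" + str(cnt) + "}"
--     inner_mask += "$"
--     return inner_mask
-- ===== SOURCE B (Python) =====
-- def create_mask(mask: str, letters: str) -> str: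
--     # Stage 1: normalize both wildcards to '*' and split the mask into literal
--     # segments; a run of k wildcards shows up as k-1 empty segments in between.
--     segs = mask.replace('?', '*').split('*')
--     # Stage 2: reassemble; the run length before a literal segment is the index
--     # distance to the previous literal segment (gap arithmetic, no counting pass).
--     out = '^' + segs[0]
--     prev = 0
--     for i, seg in enumerate(segs):
--         if i > 0 and seg:
--             out += '[' + letters + ']{' + str(i - prev) + '}' + seg
--             prev = i
--     if prev < len(segs) - 1:
--         out += '[' + letters + ']{' + str(len(segs) - 1 - prev) + '}'
--     return out + '$'
-- ===== Notes on version B (the rewrite author's own statement) =====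
-- stated objective: alternative
-- what changed: Replaces A's per-character scan with counter-and-flush accumulation by a staged split/reassemble algorithm: normalize '?' to '*', split the mask into literal segments, and rebuild the regex recovering each wildcard-run length from the index distance between consecutive non-empty segments (gap arithmetic, no character classification or run counter).
import Mathlib
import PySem

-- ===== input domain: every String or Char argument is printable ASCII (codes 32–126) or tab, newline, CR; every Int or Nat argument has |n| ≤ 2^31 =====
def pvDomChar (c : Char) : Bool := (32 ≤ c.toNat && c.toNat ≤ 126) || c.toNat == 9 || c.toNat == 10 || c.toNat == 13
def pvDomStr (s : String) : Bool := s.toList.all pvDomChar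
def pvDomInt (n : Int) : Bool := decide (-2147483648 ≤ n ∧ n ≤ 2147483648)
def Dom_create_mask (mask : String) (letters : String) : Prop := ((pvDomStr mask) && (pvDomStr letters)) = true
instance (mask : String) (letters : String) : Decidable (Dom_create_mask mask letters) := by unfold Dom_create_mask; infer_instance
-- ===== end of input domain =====

-- B replaces A's per-character counter-and-flush scan by a staged algorithm:
-- normalize '?'→'*', split on '*', and reassemble recovering each wildcard-run
-- length from the index distance between non-empty segments (objective: alternative).

-- ===== PORT A =====
-- "[" + letters + "]{" + str(cnt) + "}"  appended to the accumulator
def pvFlushA (letters : List Char) (acc : List Char) (cnt : Int) : List Char :=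
  acc ++ ['['] ++ letters ++ [']', '{'] ++ PySem.Int.toChars cnt ++ ['}']

-- the body of A's for-loop, over state (inner_mask, cnt)
def pvStepA (letters : List Char) (st : List Char × Int) (ch : Char) : List Char × Int :=
  if ch = '*' ∨ ch = '?' then (st.1, st.2 + 1)
  else ((if st.2 > 0 then pvFlushA letters st.1 st.2 else st.1) ++ [ch], 0)

-- the trailing "if cnt > 0: flush" after the loop
def pvFinishA (letters : List Char) (st : List Char × Int) : List Char :=
  if st.2 > 0 then pvFlushA letters st.1 st.2 else st.1

def create_mask (mask : String) (letters : String) : String :=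
  String.ofList (pvFinishA letters.toList (mask.toList.foldl (pvStepA letters.toList) (['^'], 0)) ++ ['$'])

-- ===== PORT B =====
-- '[' + letters + ']{' + str(k) + '}'
def pvCls (letters : List Char) (k : Int) : List Char :=
  ['['] ++ letters ++ [']', '{'] ++ PySem.Int.toChars k ++ ['}']

-- the body of B's for-loop over enumerate(segs), state (out, prev)
def pvStepB (letters : List Char) (st : List Char × Int) (p : Int × List Char) : List Char × Int :=
  if p.1 > 0 ∧ p.2 ≠ [] then (st.1 ++ pvCls letters (p.1 - st.2) ++ p.2, p.1) else st

-- the trailing "if prev < len(segs) - 1" after the loop (m = len(segs))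
def pvFinB (letters : List Char) (st : List Char × Int) (m : Int) : List Char :=
  if st.2 < m - 1 then st.1 ++ pvCls letters (m - 1 - st.2) else st.1

-- segs = mask.replace('?', '*').split('*')
def pvSegs (mask : List Char) : List (List Char) :=
  PySem.Chars.splitOn (PySem.Chars.replace mask ['?'] ['*']) ['*']

-- segs[0] (split never returns an empty list; headD is only a totality guard)
def create_mask_alt (mask : String) (letters : String) : String :=
  String.ofList (pvFinB letters.toList
    ((PySem.List.enumerate (pvSegs mask.toList)).foldl (pvStepB letters.toList)
      ('^' :: (pvSegs mask.toList).headD [], 0))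
    ((pvSegs mask.toList).length : Int) ++ ['$'])

-- ===== PRECONDITION & SPEC =====
def Spec_create_mask (mask : String) (letters : String) (out : String) : Prop := out = create_mask_alt mask letters
instance (mask : String) (letters : String) (out : String) : Decidable (Spec_create_mask mask letters out) := by unfold Spec_create_mask; infer_instance

-- ===== CLAIM (what is proved, stated in full; the proofs are below) =====
def Claim_equal_create_mask : Prop := ∀ (mask : String) (letters : String), Dom_create_mask mask letters → Spec_create_mask mask letters (create_mask mask letters)

-- ===== LEMMAS AND PROOFS =====

def pvIsWild (c : Char) : Bool := c = '*' || c = '?'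

-- canonical run decomposition of the mask (proof-side intermediate)
def pvPartsB (letters : List Char) : List Char → List (List Char)
  | [] => []
  | c :: rest =>
    if pvIsWild c then
      (['['] ++ letters ++ [']', '{']
        ++ PySem.Int.toChars ((1 + (rest.takeWhile pvIsWild).length : Nat) : Int) ++ ['}'])
        :: pvPartsB letters (rest.dropWhile pvIsWild)
    else [c] :: pvPartsB letters rest
  termination_by l => l.length
  decreasing_by
  · exact Nat.lt_succ_of_le (List.length_dropWhile_le pvIsWild rest)
  · exact Nat.lt_succ_self _

def pvNorm (c : Char) : Char := if c = '?' then '*' else c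

-- split on '*' as (first segment, later segments)
def pvWsplit : List Char → List Char × List (List Char)
  | [] => ([], [])
  | c :: r =>
    if c = '*' then ([], (pvWsplit r).1 :: (pvWsplit r).2)
    else (c :: (pvWsplit r).1, (pvWsplit r).2)

theorem pvEnumCons {α : Type} (x : α) (xs : List α) (n : Int) :
    PySem.List.enumerate (x :: xs) n = (n, x) :: PySem.List.enumerate xs (n + 1) := by
  simp [PySem.List.enumerate]


theorem pvReplaceGo (l : List Char) : ∀ (fuel : Nat) (acc : List Char), l.length ≤ fuel →
    PySem.Chars.replace.go ['?'] ['*'] fuel l acc = acc.reverse ++ l.map pvNorm := by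
  induction l with
  | nil =>
    intro fuel acc h
    cases fuel <;> simp [PySem.Chars.replace.go]
  | cons c t ih =>
    intro fuel acc h
    cases fuel with
    | zero => simp at h
    | succ f =>
      have ht : t.length ≤ f := by simpa using h
      rw [PySem.Chars.replace.go]
      by_cases hc : c = '?'
      · subst hc
        simp [ih f _ ht, pvNorm]
      · have hb : ('?' == c) = false := by simp [Ne.symm hc]
        simp [List.isPrefixOf, hb, ih f _ ht, pvNorm, hc]


theorem pvReplaceEq (cs : List Char) :
    PySem.Chars.replace cs ['?'] ['*'] = cs.map pvNorm := by
  rw [PySem.Chars.replace]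
  simp [pvReplaceGo cs cs.length [] le_rfl]


theorem pvSplitGo (l : List Char) : ∀ (fuel : Nat) (cur : List Char) (acc : List (List Char)),
    l.length ≤ fuel →
    PySem.Chars.splitOn.go ['*'] fuel l cur acc
      = acc.reverse ++ (cur.reverse ++ (pvWsplit l).1) :: (pvWsplit l).2 := by
  induction l with
  | nil =>
    intro fuel cur acc h
    cases fuel <;> simp [PySem.Chars.splitOn.go, pvWsplit]
  | cons c t ih =>
    intro fuel cur acc h
    cases fuel with
    | zero => simp at h
    | succ f =>
      have ht : t.length ≤ f := by simpa using h
      rw [PySem.Chars.splitOn.go]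
      by_cases hc : c = '*'
      · subst hc
        simp [ih f _ _ ht, pvWsplit]
      · have hb : ('*' == c) = false := by simp [Ne.symm hc]
        simp [List.isPrefixOf, hb, ih f _ _ ht, pvWsplit, hc]


theorem pvSplitOnEq (ns : List Char) :
    PySem.Chars.splitOn ns ['*'] = (pvWsplit ns).1 :: (pvWsplit ns).2 := by
  rw [PySem.Chars.splitOn]
  simp [pvSplitGo ns (ns.length + 1) [] [] (Nat.le_succ _)]

theorem pvSegsEq (cs : List Char) :
    pvSegs cs = (pvWsplit (cs.map pvNorm)).1 :: (pvWsplit (cs.map pvNorm)).2 := by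
  rw [pvSegs, pvReplaceEq, pvSplitOnEq]


theorem pvWsplitJoin (ns : List Char) :
    (pvWsplit ns).1 ++ ((pvWsplit ns).2.map (fun s => '*' :: s)).flatten = ns := by
  induction ns with
  | nil => simp [pvWsplit]
  | cons c r ih =>
    by_cases hc : c = '*'
    · subst hc
      simp only [pvWsplit, ite_true]
      simpa using ih
    · simp only [pvWsplit, if_neg hc]
      simpa using ih


theorem pvWsplitMem (ns : List Char) :
    (∀ c ∈ (pvWsplit ns).1, c ≠ '*' ∧ c ∈ ns)
      ∧ (∀ s ∈ (pvWsplit ns).2, ∀ c ∈ s, c ≠ '*' ∧ c ∈ ns) := by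
  induction ns with
  | nil => simp [pvWsplit]
  | cons c r ih =>
    by_cases hc : c = '*'
    · subst hc
      refine ⟨by simp [pvWsplit], ?_⟩
      intro s hs d hd
      simp only [pvWsplit, ite_true, List.mem_cons] at hs
      rcases hs with h1 | hs
      · rw [h1] at hd
        exact ⟨(ih.1 d hd).1, List.mem_cons_of_mem _ (ih.1 d hd).2⟩
      · exact ⟨(ih.2 s hs d hd).1, List.mem_cons_of_mem _ (ih.2 s hs d hd).2⟩
    · constructor
      · intro d hd
        simp only [pvWsplit, if_neg hc, List.mem_cons] at hd
        rcases hd with rfl | hd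
        · exact ⟨hc, List.mem_cons_self⟩
        · exact ⟨(ih.1 d hd).1, List.mem_cons_of_mem _ (ih.1 d hd).2⟩
      · intro s hs d hd
        simp only [pvWsplit, if_neg hc] at hs
        exact ⟨(ih.2 s hs d hd).1, List.mem_cons_of_mem _ (ih.2 s hs d hd).2⟩


theorem pvSegNonWild (cs : List Char) (c : Char) (h1 : c ≠ '*') (h2 : c ∈ cs.map pvNorm) :
    pvIsWild c = false := by
  obtain ⟨a, _, rfl⟩ := List.mem_map.mp h2
  by_cases ha : a = '?'
  · subst ha; simp [pvNorm] at h1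
  · have h1' : a ≠ '*' := by simpa [pvNorm, ha] using h1
    simp [pvIsWild, pvNorm, ha, h1']


theorem pvPartsLiteral (letters s t : List Char) (h : ∀ c ∈ s, pvIsWild c = false) :
    pvPartsB letters (s ++ t) = s.map (fun c => [c]) ++ pvPartsB letters t := by
  induction s with
  | nil => simp
  | cons c s' ih =>
    have hc := h c List.mem_cons_self
    rw [List.cons_append, pvPartsB]
    simp only [hc, Bool.false_eq_true, if_false]
    rw [ih (fun d hd => h d (List.mem_cons_of_mem _ hd))]
    simp


theorem pvPartsReplicate (letters : List Char) (j : Nat) (s : List Char)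
    (h : ∀ c, s.head? = some c → pvIsWild c = false) :
    pvPartsB letters (List.replicate (j + 1) '*' ++ s)
      = (['['] ++ letters ++ [']', '{'] ++ PySem.Int.toChars ((j + 1 : Nat) : Int) ++ ['}'])
        :: pvPartsB letters s := by
  have hw : pvIsWild '*' = true := by simp [pvIsWild]
  have htw : ∀ j' : Nat, (List.replicate j' '*' ++ s).takeWhile pvIsWild = List.replicate j' '*' := by
    intro j'
    induction j' with
    | zero =>
      cases hs : s with
      | nil => simp
      | cons a s' =>
        have := h a (by simp [hs])
        simp [this]
    | succ j'' ih =>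
      simp [List.replicate_succ, hw, ih]
  have hdw : ∀ j' : Nat, (List.replicate j' '*' ++ s).dropWhile pvIsWild = s := by
    intro j'
    induction j' with
    | zero =>
      cases hs : s with
      | nil => simp
      | cons a s' =>
        have := h a (by simp [hs])
        simp [this]
    | succ j'' ih =>
      simp [List.replicate_succ, hw, ih]
  rw [List.replicate_succ, List.cons_append, pvPartsB]
  simp only [hw, if_true, htw, hdw, List.length_replicate]
  rw [Nat.add_comm 1 j]


theorem pvPartsNorm (letters cs : List Char) :
    pvPartsB letters (cs.map pvNorm) = pvPartsB letters cs := by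
  have key : ∀ n (cs : List Char), cs.length ≤ n →
      pvPartsB letters (cs.map pvNorm) = pvPartsB letters cs := by
    intro n
    induction n with
    | zero =>
      intro cs h
      have : cs = [] := List.eq_nil_of_length_eq_zero (Nat.le_zero.mp h)
      subst this; simp
    | succ n ih =>
      intro cs h
      match cs with
      | [] => simp
      | c :: rest =>
        have hnw : (pvIsWild ∘ pvNorm) = pvIsWild := by
          funext a
          by_cases ha : a = '?' <;> simp [pvNorm, pvIsWild, ha]
        have hwn : pvIsWild (pvNorm c) = pvIsWild c := congrFun hnw c
        by_cases hc : pvIsWild c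
        · rw [List.map_cons, pvPartsB, pvPartsB]
          simp only [hwn, hc, if_true]
          rw [List.takeWhile_map, List.dropWhile_map, hnw]
          have hlen : (rest.dropWhile pvIsWild).length ≤ n := by
            have h1 := List.length_dropWhile_le pvIsWild rest
            have h2 : rest.length ≤ n := by simpa using h
            omega
          rw [ih _ hlen]
          simp
        · have hq : c ≠ '?' := by
            intro hq; subst hq; simp [pvIsWild] at hc
          have hn : pvNorm c = c := by simp [pvNorm, hq]
          rw [List.map_cons, hn, pvPartsB, pvPartsB]
          simp only [hc, Bool.false_eq_true, if_false]
          have hlen : rest.length ≤ n := by simpa using h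
          rw [ih _ hlen]
  exact key cs.length cs le_rfl


theorem pvFlattenSingletons (l : List Char) : (l.map (fun c => [c])).flatten = l := by
  induction l with
  | nil => simp
  | cons c t ih => simp [ih]

-- B's reassembly loop computes the canonical run decomposition of the suffix
theorem pvMaster (letters : List Char) (rest : List (List Char)) :
    ∀ (n prev : Int) (out : List Char), 1 ≤ n → 0 ≤ prev → prev ≤ n - 1 →
    (∀ s ∈ rest, ∀ c ∈ s, pvIsWild c = false) →
    pvFinB letters ((PySem.List.enumerate rest n).foldl (pvStepB letters) (out, prev)) (n + rest.length)
      = out ++ (pvPartsB letters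
          (List.replicate (n - 1 - prev).toNat '*' ++ (rest.map (fun s => '*' :: s)).flatten)).flatten := by
  induction rest with
  | nil =>
    intro n prev out hn hp hpn _
    have he : PySem.List.enumerate ([] : List (List Char)) n = [] := by
      simp [PySem.List.enumerate]
    rw [he, List.foldl_nil]
    by_cases h : prev < n - 1
    · have hnn : (0:Int) ≤ n - 1 - prev := by omega
      obtain ⟨j, hj⟩ : ∃ j, (n - 1 - prev).toNat = j + 1 := ⟨(n - 1 - prev).toNat - 1, by omega⟩
      have hct : ((j + 1 : Nat) : Int) = n - 1 - prev := by
        have := Int.toNat_of_nonneg hnn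
        omega
      simp only [List.map_nil, List.flatten_nil, hj]
      rw [pvPartsReplicate letters j [] (by intro c hc; simp at hc)]
      simp [pvFinB, pvCls, h, hct, pvPartsB]
    · have h0 : (n - 1 - prev).toNat = 0 := by omega
      simp [pvFinB, h, h0, pvPartsB]
  | cons s rest' ih =>
    intro n prev out hn hp hpn hnw
    have hm : n + ((s :: rest').length : Int) = (n + 1) + (rest'.length : Int) := by
      push_cast [List.length_cons]; ring
    rw [pvEnumCons, List.foldl_cons, hm]
    have htail : ∀ t ∈ rest', ∀ c ∈ t, pvIsWild c = false :=
      fun t ht => hnw t (List.mem_cons_of_mem _ ht)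
    by_cases hs : s = []
    · subst hs
      have hstep : pvStepB letters (out, prev) (n, ([] : List Char)) = (out, prev) := by
        simp [pvStepB]
      rw [hstep, ih (n + 1) prev out (by omega) hp (by omega) htail]
      have hk : (n + 1 - 1 - prev).toNat = (n - 1 - prev).toNat + 1 := by omega
      have hlist : List.replicate ((n + 1) - 1 - prev).toNat '*'
            ++ ((rest'.map fun s => '*' :: s)).flatten
          = List.replicate (n - 1 - prev).toNat '*'
            ++ ((([] : List Char) :: rest').map fun s => '*' :: s).flatten := by
        rw [hk, List.replicate_succ']
        simp
      rw [hlist]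
    · have hpos : (0:Int) < n := by omega
      have hstep : pvStepB letters (out, prev) (n, s)
          = (out ++ pvCls letters (n - prev) ++ s, n) := by
        simp [pvStepB, hs, hpos]
      rw [hstep, ih (n + 1) n _ (by omega) (by omega) (by omega) htail]
      have h0 : (n + 1 - 1 - n).toNat = 0 := by omega
      rw [h0]
      simp only [List.replicate, List.nil_append]
      -- rewrite the goal's right-hand side through the canonical decomposition
      have hnn : (0:Int) ≤ n - 1 - prev := by omega
      set k := (n - 1 - prev).toNat with hkdef
      have hflat : (((s :: rest').map fun s => '*' :: s)).flatten
          = '*' :: (s ++ ((rest'.map fun s => '*' :: s)).flatten) := by simp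
      have hrep : List.replicate k '*' ++ ('*' :: (s ++ ((rest'.map fun s => '*' :: s)).flatten))
          = List.replicate (k + 1) '*' ++ (s ++ ((rest'.map fun s => '*' :: s)).flatten) := by
        rw [List.replicate_succ']
        simp
      have hhead : ∀ c, (s ++ ((rest'.map fun s => '*' :: s)).flatten).head? = some c →
          pvIsWild c = false := by
        intro c hc
        have : (s ++ ((rest'.map fun s => '*' :: s)).flatten).head? = s.head? := by
          cases s with
          | nil => exact absurd rfl hs
          | cons a s' => simp
        rw [this] at hc
        exact hnw s List.mem_cons_self c (List.mem_of_mem_head? hc)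
      have hsnw : ∀ c ∈ s, pvIsWild c = false := hnw s List.mem_cons_self
      have hct : ((k + 1 : Nat) : Int) = n - prev := by
        have := Int.toNat_of_nonneg hnn
        omega
      rw [hflat, hrep, pvPartsReplicate letters k _ hhead,
        pvPartsLiteral letters s _ hsnw]
      simp [pvCls, hct, pvFlattenSingletons]


-- A's loop computes the canonical run decomposition (proved in full)
theorem pvFoldA_wild (letters : List Char) (l : List Char) (h : ∀ c ∈ l, pvIsWild c)
    (acc : List Char) (cnt : Int) :
    l.foldl (pvStepA letters) (acc, cnt) = (acc, cnt + l.length) := by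
  induction l generalizing cnt with
  | nil => simp
  | cons c rest ih =>
    have hc := h c (List.mem_cons_self)
    simp only [pvIsWild, Bool.or_eq_true, decide_eq_true_eq] at hc
    have : pvStepA letters (acc, cnt) c = (acc, cnt + 1) := by
      simp [pvStepA, hc]
    rw [List.foldl_cons, this, ih (fun d hd => h d (List.mem_cons_of_mem _ hd))]
    simp; ring

theorem pvMain (letters : List Char) (n : Nat) :
    ∀ l : List Char, l.length ≤ n → ∀ acc : List Char,
    pvFinishA letters (l.foldl (pvStepA letters) (acc, 0)) = acc ++ (pvPartsB letters l).flatten := by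
  induction n with
  | zero =>
    intro l hl acc
    have : l = [] := List.eq_nil_of_length_eq_zero (Nat.le_zero.mp hl)
    subst this; simp [pvPartsB, pvFinishA]
  | succ n ih =>
    intro l hl acc
    match l with
    | [] => simp [pvPartsB, pvFinishA]
    | c :: rest =>
      by_cases hc : pvIsWild c
      · have hc' : c = '*' ∨ c = '?' := by
          simpa [pvIsWild, Bool.or_eq_true, decide_eq_true_eq] using hc
        set w := rest.takeWhile pvIsWild with hw
        set r := rest.dropWhile pvIsWild with hr
        have hrest : w ++ r = rest := List.takeWhile_append_dropWhile
        have hwAll : ∀ d ∈ w, pvIsWild d := fun d hd => List.mem_takeWhile_imp hd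
        have hfold1 : (c :: w).foldl (pvStepA letters) (acc, 0) = (acc, 1 + (w.length : Int)) := by
          rw [List.foldl_cons]
          have h1 : pvStepA letters (acc, 0) c = (acc, 1) := by simp [pvStepA, hc']
          rw [h1, pvFoldA_wild letters w hwAll]
        have hsplit : (c :: rest).foldl (pvStepA letters) (acc, 0)
            = r.foldl (pvStepA letters) (acc, 1 + (w.length : Int)) := by
          conv_lhs => rw [show c :: rest = (c :: w) ++ r by rw [← hrest, List.cons_append]]
          rw [List.foldl_append, hfold1]
        have hpos : (0:Int) < 1 + w.length := by positivity
        have hcast : ((1 + w.length : Nat) : Int) = 1 + (w.length : Int) := by push_cast; ring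
        have hpart : pvPartsB letters (c :: rest)
            = (['['] ++ letters ++ [']', '{']
                ++ PySem.Int.toChars ((1 + w.length : Nat) : Int) ++ ['}']) :: pvPartsB letters r := by
          rw [pvPartsB]; simp only [if_pos hc, ← hw, ← hr]
        match hr0 : r with
        | [] =>
          rw [hsplit, List.foldl_nil, hpart]
          simp [pvFinishA, pvFlushA, hpos, hcast, pvPartsB]
        | d :: r' =>
          have hd0 : pvIsWild d = false := by
            have h := List.head?_dropWhile_not pvIsWild rest
            rw [← hr] at h
            simpa using h
          have hd : ¬ pvIsWild d := by simp [hd0]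
          have hd' : ¬ (d = '*' ∨ d = '?') := by
            simpa [pvIsWild, Bool.or_eq_true, decide_eq_true_eq] using hd
          have hstep : pvStepA letters (acc, 1 + (w.length : Int)) d
              = (pvFlushA letters acc (1 + w.length) ++ [d], 0) := by
            simp [pvStepA, hd', hpos]
          have hlen : r'.length ≤ n := by
            have h1 : (c :: rest).length ≤ n + 1 := hl
            have h2 : rest.length = w.length + (d :: r').length := by
              rw [← hrest]; simp
            simp at h1 h2; omega
          have hih := ih r' hlen (pvFlushA letters acc (1 + w.length) ++ [d])
          rw [hsplit, List.foldl_cons, hstep, hih, hpart]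
          rw [pvPartsB]
          simp only [if_neg hd]
          simp [pvFlushA, hcast]
      · have hc' : ¬ (c = '*' ∨ c = '?') := by
          simpa [pvIsWild, Bool.or_eq_true, decide_eq_true_eq] using hc
        have hstep : pvStepA letters (acc, 0) c = (acc ++ [c], 0) := by
          simp [pvStepA, hc']
        have hlen : rest.length ≤ n := by
          have := hl; simp at this; omega
        have hih := ih rest hlen (acc ++ [c])
        rw [List.foldl_cons, hstep, hih, pvPartsB]
        simp [if_neg hc]

-- ===== VERDICT (by name: the statement is the Claim_ definition above) =====
theorem create_mask_spec : Claim_equal_create_mask := by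
  intro mask letters _
  unfold Spec_create_mask create_mask create_mask_alt
  rw [pvSegsEq]
  set cs := mask.toList with hcs
  set ns := cs.map pvNorm with hns
  set f := (pvWsplit ns).1 with hf
  set sl := (pvWsplit ns).2 with hsl
  have hnw : ∀ s ∈ sl, ∀ c ∈ s, pvIsWild c = false := by
    intro s hs c hc
    have h := (pvWsplitMem ns).2 s hs c hc
    exact pvSegNonWild cs c h.1 (hns ▸ h.2)
  have hm : ((f :: sl).length : Int) = 1 + (sl.length : Int) := by
    push_cast [List.length_cons]; ring
  have he : PySem.List.enumerate (f :: sl) = (0, f) :: PySem.List.enumerate sl 1 := by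
    rw [pvEnumCons]; norm_num
  have hstep : pvStepB letters.toList ('^' :: (f :: sl).headD [], 0) (0, f)
      = ('^' :: f, 0) := by
    simp [pvStepB]
  rw [hm, he, List.foldl_cons, hstep,
    pvMaster letters.toList sl 1 0 ('^' :: f) le_rfl le_rfl (by norm_num) hnw]
  have h0 : ((1 : Int) - 1 - 0).toNat = 0 := by norm_num
  rw [h0]
  simp only [List.replicate, List.nil_append]
  have hlit : pvPartsB letters.toList (f ++ ((sl.map fun s => '*' :: s)).flatten)
      = f.map (fun c => [c]) ++ pvPartsB letters.toList ((sl.map fun s => '*' :: s)).flatten := by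
    refine pvPartsLiteral letters.toList f _ ?_
    intro c hc
    have h := (pvWsplitMem ns).1 c hc
    exact pvSegNonWild cs c h.1 (hns ▸ h.2)
  have hjoin : f ++ ((sl.map fun s => '*' :: s)).flatten = ns := by
    rw [hf, hsl]; exact pvWsplitJoin ns
  have hA := pvMain letters.toList cs.length cs le_rfl ['^']
  rw [hA]
  have hparts : f ++ (pvPartsB letters.toList ((sl.map fun s => '*' :: s)).flatten).flatten
      = (pvPartsB letters.toList cs).flatten := by
    rw [← pvPartsNorm letters.toList cs, ← hns, ← hjoin, hlit]
    simp [pvFlattenSingletons]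
  rw [← hparts]
  simp
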